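-- pv_equiv track=rewrite | github.com/singular-labs/sleek | backend/src/sleek/samples/sierpinski.py | get_sierpinski_triangle
-- ===== SOURCE A (Python) =====
-- def get_triangle(height):
--     width = height * 2
--
--     # Init
--     array = []
--     for i in range(height):
--         array.append([" "] * width)
--
--     # Sides
--     for i in range(0, height):
--         # Distance of current / from start (or \ from end)
--         distance = height - i - 1
--         array[i][distance] = "/"
--         array[i][width - distance - 1] = "\\"
--
--     # Base
--     for j in range(1, width - 1):
--         array[height - 1][j] = "_"
--
--     return array
--
-- def get_sierpinski_triangle(base_height, depth):
--     if depth == 0: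
--         return get_triangle(base_height)
--     else:
--         inner = get_sierpinski_triangle(base_height, depth - 1)
--         inner_height = len(inner)
--
--         # Top triangle
--         result = []
--         for i, row in enumerate(inner):
--             result.append([" "] * inner_height + row + [" "] * inner_height)
--
--         # Bottom triangles
--         for row in inner:
--             result.append(row + row)
--
--         return result
-- ===== SOURCE B (Python) =====
-- def get_triangle(height):
--     width = height * 2
--
--     # Init
--     array = []
--     for i in range(height):
--         array.append([" "] * width)
--
--     # Sides
--     for i in range(0, height):
--         # Distance of current / from start (or \ from end)
--         distance = height - i - 1
--         array[i][distance] = "/"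
--         array[i][width - distance - 1] = "\\"
--
--     # Base
--     for j in range(1, width - 1):
--         array[height - 1][j] = "_"
--
--     return array
--
-- def get_sierpinski_triangle(base_height, depth):
--     # Iterative doubling instead of recursion.
--     current = get_triangle(base_height)
--     for _ in range(depth):
--         h = len(current)
--         pad = [" "] * h
--         current = [pad + row + pad for row in current] + [row + row for row in current]
--     return current
-- ===== Notes on version B (the rewrite author's own statement) =====
-- stated objective: simpler
-- what changed: get_sierpinski_triangle is rewritten as an iterative doubling loop (current = doubled(current), depth times) instead of a linear recursion; get_triangle is unchanged.
import Mathlib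
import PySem

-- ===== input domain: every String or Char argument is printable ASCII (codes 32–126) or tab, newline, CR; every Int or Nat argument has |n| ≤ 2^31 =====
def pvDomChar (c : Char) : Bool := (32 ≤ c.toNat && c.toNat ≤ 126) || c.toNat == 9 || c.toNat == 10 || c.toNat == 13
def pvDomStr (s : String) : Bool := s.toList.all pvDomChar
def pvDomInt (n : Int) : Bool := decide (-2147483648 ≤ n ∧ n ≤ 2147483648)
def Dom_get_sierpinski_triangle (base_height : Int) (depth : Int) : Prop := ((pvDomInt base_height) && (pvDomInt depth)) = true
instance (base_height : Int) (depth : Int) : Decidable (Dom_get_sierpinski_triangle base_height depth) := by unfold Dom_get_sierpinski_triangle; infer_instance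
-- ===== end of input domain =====

-- B replaces A's linear recursion by an iterative doubling loop (objective: simpler); get_triangle is shared verbatim.

-- ===== PORT A =====
-- get_triangle, shared helper of both Pythons (identical code in Source A and Source B).
-- All list-index writes here are always in range (distance, width-distance-1 ∈ [0, width),
-- and the base loop only runs when height ≥ 2), so List.set/List.getD are exact.
def get_triangle (height : Int) : List (List String) :=
  let width := height * 2
  -- Init
  let array : List (List String) := (PySem.List.pyRange 0 height 1).foldl
    (fun a _ => a ++ [List.replicate width.toNat " "]) []
  -- Sides
  let array := (PySem.List.pyRange 0 height 1).foldl
    (fun a i =>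
      let distance := height - i - 1
      let a := a.set i.toNat ((a.getD i.toNat []).set distance.toNat "/")
      a.set i.toNat ((a.getD i.toNat []).set (width - distance - 1).toNat "\\")) array
  -- Base
  (PySem.List.pyRange 1 (width - 1) 1).foldl
    (fun a j => a.set (height - 1).toNat ((a.getD (height - 1).toNat []).set j.toNat "_")) array

-- A's recursion, on the fuel depth.toNat (exact for depth ≥ 0, which Pre_ requires;
-- for depth < 0 the Python recurses without bound and raises RecursionError).
def sierAuxA (base_height : Int) : Nat → List (List String)
  | 0 => get_triangle base_height
  | n + 1 =>
    let inner := sierAuxA base_height n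
    let inner_height : Int := (inner.length : Int)
    -- Top triangle
    let result := inner.foldl
      (fun r row => r ++ [List.replicate inner_height.toNat " " ++ row ++ List.replicate inner_height.toNat " "]) []
    -- Bottom triangles
    inner.foldl (fun r row => r ++ [row ++ row]) result

def get_sierpinski_triangle (base_height : Int) (depth : Int) : List (List String) :=
  sierAuxA base_height depth.toNat

-- ===== PORT B =====
def get_sierpinski_triangle_alt (base_height : Int) (depth : Int) : List (List String) :=
  (PySem.List.pyRange 0 depth 1).foldl
    (fun current _ =>
      let h : Int := (current.length : Int)
      let pad := List.replicate h.toNat " "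
      (current.map (fun row => pad ++ row ++ pad)) ++ (current.map (fun row => row ++ row)))
    (get_triangle base_height)

-- ===== PRECONDITION & SPEC =====
-- Pre_ excludes depth < 0, on which A raises RecursionError (unbounded recursion).
def Pre_get_sierpinski_triangle (base_height : Int) (depth : Int) : Prop := 0 ≤ depth
instance (base_height : Int) (depth : Int) : Decidable (Pre_get_sierpinski_triangle base_height depth) := by unfold Pre_get_sierpinski_triangle; infer_instance
def pvWitness_get_sierpinski_triangle : Int × Int := (2, 1)

def Spec_get_sierpinski_triangle (base_height : Int) (depth : Int) (out : List (List String)) : Prop := out = get_sierpinski_triangle_alt base_height depth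
instance (base_height : Int) (depth : Int) (out : List (List String)) : Decidable (Spec_get_sierpinski_triangle base_height depth out) := by unfold Spec_get_sierpinski_triangle; infer_instance

-- ===== CLAIM (what is proved, stated in full; the proofs are below) =====
def Claim_equal_get_sierpinski_triangle : Prop := ∀ (base_height : Int) (depth : Int), Dom_get_sierpinski_triangle base_height depth → Pre_get_sierpinski_triangle base_height depth → Spec_get_sierpinski_triangle base_height depth (get_sierpinski_triangle base_height depth)

-- ===== LEMMAS AND PROOFS =====

-- A's fuel recursion equals B's fold over range(n), for every natural fuel n.
theorem sierAuxA_eq_alt (base_height : Int) (n : Nat) :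
    sierAuxA base_height n = get_sierpinski_triangle_alt base_height n := by
  induction n with
  | zero =>
    simp [sierAuxA, get_sierpinski_triangle_alt]
  | succ n ih =>
    have hsplit : PySem.List.pyRange 0 ((n : Int) + 1) 1
        = PySem.List.pyRange 0 (n : Int) 1 ++ [(n : Int)] :=
      PySem.List.pyRange_one_succ_right (by exact_mod_cast Nat.zero_le n)
    simp only [get_sierpinski_triangle_alt] at ih ⊢
    push_cast
    rw [hsplit, List.foldl_append, ← ih]
    simp only [sierAuxA, List.foldl]
    rw [PySem.List.foldl_append_singleton_eq_map, PySem.List.foldl_append_singleton_eq_map]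
    simp

-- ===== VERDICT (by name: the statement is the Claim_ definition above) =====
theorem get_sierpinski_triangle_spec : Claim_equal_get_sierpinski_triangle := by
  intro base_height depth _ hpre
  unfold Spec_get_sierpinski_triangle get_sierpinski_triangle
  have h : ((depth.toNat : Int)) = depth := Int.toNat_of_nonneg hpre
  rw [sierAuxA_eq_alt, h]
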